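-- pv_equiv track=rewrite | github.com/jbrandew/randomThoughts | uhhTestSpace.py | min_size_lists_with_index
-- ===== SOURCE A (Python) =====
-- import heapq
--
-- def min_size_lists_with_index(list_of_lists):
--     heap = [(len(lst), lst, index) for index, lst in enumerate(list_of_lists)]
--     heapq.heapify(heap)
--
--     # Pop the smallest list
--     smallest = heapq.heappop(heap)
--
--     # Find all lists with the same size
--     min_size = smallest[0]
--     min_size_lists = [smallest]
--
--     while heap and heap[0][0] == min_size:
--         min_size_lists.append(heapq.heappop(heap))
--
--     return min_size_lists
-- ===== SOURCE B (Python) =====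
-- def min_size_lists_with_index(list_of_lists):
--     m = min(len(lst) for lst in list_of_lists)
--     return sorted((m, lst, i) for i, lst in enumerate(list_of_lists) if len(lst) == m)
-- ===== Notes on version B (the rewrite author's own statement) =====
-- stated objective: simpler
-- what changed: B replaces the heap (heapify + repeated heappop) by one linear scan for the minimum length followed by sorting only the minimum-length candidates, whose tuple order reproduces A's pop order.
import Mathlib
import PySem

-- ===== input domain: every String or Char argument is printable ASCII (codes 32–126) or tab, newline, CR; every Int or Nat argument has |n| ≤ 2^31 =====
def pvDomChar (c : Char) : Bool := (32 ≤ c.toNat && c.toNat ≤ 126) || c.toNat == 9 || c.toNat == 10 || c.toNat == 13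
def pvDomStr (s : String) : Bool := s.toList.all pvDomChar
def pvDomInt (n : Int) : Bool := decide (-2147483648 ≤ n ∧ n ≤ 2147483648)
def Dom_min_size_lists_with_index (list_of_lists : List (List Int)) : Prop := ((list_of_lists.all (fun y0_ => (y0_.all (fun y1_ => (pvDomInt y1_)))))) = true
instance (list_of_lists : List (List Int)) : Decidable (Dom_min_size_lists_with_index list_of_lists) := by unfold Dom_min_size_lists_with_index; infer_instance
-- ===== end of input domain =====

-- B replaces A's heapify-and-pop by one min-length scan plus a sort of the minimum-length
-- candidates only; same return value, no speed claim.

-- Python's comparison of the tuples (len, lst, index) is lexicographic (lists themselves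
-- compared lexicographically): exactly the lexicographic linear order below.
def pvKey (e : Int × List Int × Int) : Int ×ₗ (List Int ×ₗ Int) := toLex (e.1, toLex (e.2.1, e.2.2))

-- ===== PORT A =====
-- heapq.heapify / heappop are stdlib calls; PySem has no heapq, so they are ported by hand
-- as a mergeable (skew) min-heap under Python's tuple order pvKey. This is exact for A's
-- observable behaviour: all heap entries are distinct (distinct indices), so the sequence of
-- heappop results is the unique sorted order for CPython's binary heap and for this heap alike.
inductive PvHeap : Type
  | nil : PvHeap
  | node : (Int × List Int × Int) → PvHeap → PvHeap → PvHeap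

def PvHeap.size : PvHeap → Nat
  | .nil => 0
  | .node _ l r => l.size + r.size + 1

-- the Nat argument is plain fuel making the recursion structural; pvMerge always supplies
-- enough (the summed sizes), so the fuel-exhausted branch is never reached
def pvMergeF : Nat → PvHeap → PvHeap → PvHeap
  | _, .nil, h => h
  | _, h, .nil => h
  | 0, _, _ => .nil
  | n + 1, .node x l1 r1, .node y l2 r2 =>
    if pvKey x ≤ pvKey y then .node x (pvMergeF n (.node y l2 r2) r1) l1
    else .node y (pvMergeF n (.node x l1 r1) r2) l2

def pvMerge (a b : PvHeap) : PvHeap := pvMergeF (a.size + b.size) a b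

-- the while loop: pop while the heap is nonempty and its top has first component min_size
-- (fuel again only makes the recursion structural; h.size always suffices)
def pvPopLoopF : Nat → Int → List (Int × List Int × Int) → PvHeap → List (Int × List Int × Int)
  | _, _, acc, .nil => acc
  | 0, _, acc, _ => acc
  | n + 1, minSize, acc, .node y l r =>
    if y.1 = minSize then pvPopLoopF n minSize (acc ++ [y]) (pvMerge l r) else acc

def pvPopLoop (minSize : Int) (acc : List (Int × List Int × Int)) (h : PvHeap) :
    List (Int × List Int × Int) := pvPopLoopF h.size minSize acc h

-- heapify: fold the entries into the heap
def pvHeapify (xs : List (Int × List Int × Int)) : PvHeap :=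
  xs.foldl (fun h e => pvMerge h (.node e .nil .nil)) .nil

def min_size_lists_with_index (list_of_lists : List (List Int)) : List (Int × List Int × Int) :=
  -- heap = [(len(lst), lst, index) for index, lst in enumerate(list_of_lists)]; heapify
  let heap := pvHeapify ((PySem.List.enumerate list_of_lists).map
    (fun p => ((p.2.length : Int), p.2, p.1)))
  match heap with
  | .nil => []  -- heapq.heappop raises IndexError on the empty heap; excluded by Pre_
  | .node x l r => pvPopLoop x.1 [x] (pvMerge l r)  -- smallest = heappop; then the while loop

-- ===== PORT B =====
def min_size_lists_with_index_alt (list_of_lists : List (List Int)) : List (Int × List Int × Int) :=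
  match PySem.List.min? (list_of_lists.map (fun lst => (lst.length : Int))) (fun x => x) with
  | none => []  -- min() raises ValueError on the empty input; excluded by Pre_
  | some m =>
    PySem.List.sorted
      ((PySem.List.enumerate list_of_lists).filterMap
        (fun p => if (p.2.length : Int) = m then some (m, p.2, p.1) else none))
      pvKey

-- ===== PRECONDITION & SPEC =====
-- Pre_ excludes only the empty list, on which A raises IndexError (heappop of an empty heap).
def Pre_min_size_lists_with_index (list_of_lists : List (List Int)) : Prop :=
  list_of_lists ≠ []
instance (list_of_lists : List (List Int)) : Decidable (Pre_min_size_lists_with_index list_of_lists) := by unfold Pre_min_size_lists_with_index; infer_instance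

def pvWitness_min_size_lists_with_index : List (List Int) := [[1, 2], [3]]

def Spec_min_size_lists_with_index (list_of_lists : List (List Int)) (out : List (Int × List Int × Int)) : Prop := out = min_size_lists_with_index_alt list_of_lists
instance (list_of_lists : List (List Int)) (out : List (Int × List Int × Int)) : Decidable (Spec_min_size_lists_with_index list_of_lists out) := by unfold Spec_min_size_lists_with_index; infer_instance

-- ===== CLAIM (what is proved, stated in full; the proofs are below) =====
def Claim_equal_min_size_lists_with_index : Prop := ∀ (list_of_lists : List (List Int)), Dom_min_size_lists_with_index list_of_lists → Pre_min_size_lists_with_index list_of_lists → Spec_min_size_lists_with_index list_of_lists (min_size_lists_with_index list_of_lists)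

-- ===== LEMMAS AND PROOFS =====

def PvHeap.elems : PvHeap → List (Int × List Int × Int)
  | .nil => []
  | .node x l r => x :: (l.elems ++ r.elems)

-- heap-order invariant: every root is ≤ (in pvKey order) everything below it
def pvHO : PvHeap → Prop
  | .nil => True
  | .node x l r => (∀ e ∈ (PvHeap.node x l r).elems, pvKey x ≤ pvKey e) ∧ pvHO l ∧ pvHO r

theorem pvKey_inj : Function.Injective pvKey := by
  intro a b h
  simp only [pvKey, toLex_inj, Prod.mk.injEq] at h
  exact Prod.ext h.1 (Prod.ext h.2.1 h.2.2)

theorem pvKey_le_fst {a b : Int × List Int × Int} (h : pvKey a ≤ pvKey b) : a.1 ≤ b.1 := by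
  rcases Prod.Lex.le_iff.mp h with h1 | ⟨h1, _⟩
  · exact le_of_lt h1
  · exact le_of_eq h1

theorem pvElems_node (x : Int × List Int × Int) (l r : PvHeap) :
    (PvHeap.node x l r).elems = x :: (l.elems ++ r.elems) := rfl

theorem pvElems_node_coe (x : Int × List Int × Int) (l r : PvHeap) :
    (((PvHeap.node x l r).elems : List _) : Multiset _) = {x} + (↑l.elems + ↑r.elems) := by
  simp [pvElems_node, Multiset.singleton_add]

theorem pvSize_node (x : Int × List Int × Int) (l r : PvHeap) :
    (PvHeap.node x l r).size = l.size + r.size + 1 := rfl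

theorem pvMergeF_elems_ms : ∀ (n : Nat) (a b : PvHeap), a.size + b.size ≤ n →
    (((pvMergeF n a b).elems : List _) : Multiset (Int × List Int × Int))
      = ((a.elems : List _) : Multiset (Int × List Int × Int))
        + ((b.elems : List _) : Multiset (Int × List Int × Int)) := by
  intro n
  induction n with
  | zero =>
      intro a b hsz
      cases a with
      | nil => simp [pvMergeF, PvHeap.elems]
      | node x l1 r1 =>
        cases b with
        | nil => simp [pvMergeF, PvHeap.elems]
        | node y l2 r2 => simp [pvSize_node] at hsz
  | succ n ih =>
      intro a b hsz
      cases a with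
      | nil => simp [pvMergeF, PvHeap.elems]
      | node x l1 r1 =>
        cases b with
        | nil => simp [pvMergeF, PvHeap.elems]
        | node y l2 r2 =>
          rw [pvMergeF]
          split
          · rw [pvElems_node_coe, ih _ _ (by simp [pvSize_node] at hsz ⊢; omega),
              pvElems_node_coe, pvElems_node_coe]
            abel
          · rw [pvElems_node_coe, ih _ _ (by simp [pvSize_node] at hsz ⊢; omega),
              pvElems_node_coe, pvElems_node_coe]
            abel

theorem pvMerge_elems_perm (a b : PvHeap) :
    (pvMerge a b).elems.Perm (a.elems ++ b.elems) := by
  rw [← Multiset.coe_eq_coe, pvMerge, pvMergeF_elems_ms _ a b (le_refl _), ← Multiset.coe_add]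

theorem pvMergeF_HO : ∀ (n : Nat) (a b : PvHeap), a.size + b.size ≤ n →
    pvHO a → pvHO b → pvHO (pvMergeF n a b) := by
  intro n
  induction n with
  | zero =>
      intro a b hsz ha hb
      cases a with
      | nil => simpa [pvMergeF] using hb
      | node x l1 r1 =>
        cases b with
        | nil => simpa [pvMergeF] using ha
        | node y l2 r2 => simp [pvSize_node] at hsz
  | succ n ih =>
      intro a b hsz ha hb
      cases a with
      | nil => simpa [pvMergeF] using hb
      | node x l1 r1 =>
        cases b with
        | nil => simpa [pvMergeF] using ha
        | node y l2 r2 =>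
          have hmem : ∀ (p : PvHeap) (q : PvHeap) (e : Int × List Int × Int) (k : Nat),
              p.size + q.size ≤ k →
              e ∈ (pvMergeF k p q).elems → e ∈ p.elems ∨ e ∈ q.elems := by
            intro p q e k hk he
            have := pvMergeF_elems_ms k p q hk
            have hp : (pvMergeF k p q).elems.Perm (p.elems ++ q.elems) := by
              rw [← Multiset.coe_eq_coe, this, ← Multiset.coe_add]
            exact List.mem_append.mp (hp.mem_iff.mp he)
          rw [pvMergeF]
          split
          · next hle =>
            obtain ⟨hxa, hl1, hr1⟩ := ha
            have hszr : (PvHeap.node y l2 r2).size + r1.size ≤ n := by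
              simp [pvSize_node] at hsz ⊢; omega
            refine ⟨?_, ih _ _ hszr hb hr1, hl1⟩
            intro e he
            rw [pvElems_node] at he
            rcases List.mem_cons.mp he with rfl | he2
            · exact le_refl _
            rcases List.mem_append.mp he2 with hm | hl1m
            · rcases hmem _ _ _ _ hszr hm with hy | hr
              · exact le_trans hle (hb.1 e hy)
              · exact hxa e (by rw [pvElems_node]; exact List.mem_cons_of_mem _ (List.mem_append.mpr (Or.inr hr)))
            · exact hxa e (by rw [pvElems_node]; exact List.mem_cons_of_mem _ (List.mem_append.mpr (Or.inl hl1m)))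
          · next hle =>
            obtain ⟨hyb, hl2, hr2⟩ := hb
            have hyx : pvKey y ≤ pvKey x := le_of_not_ge hle
            have hszr : (PvHeap.node x l1 r1).size + r2.size ≤ n := by
              simp [pvSize_node] at hsz ⊢; omega
            refine ⟨?_, ih _ _ hszr ha hr2, hl2⟩
            intro e he
            rw [pvElems_node] at he
            rcases List.mem_cons.mp he with rfl | he2
            · exact le_refl _
            rcases List.mem_append.mp he2 with hm | hl2m
            · rcases hmem _ _ _ _ hszr hm with hx | hr
              · exact le_trans hyx (ha.1 e hx)
              · exact hyb e (by rw [pvElems_node]; exact List.mem_cons_of_mem _ (List.mem_append.mpr (Or.inr hr)))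
            · exact hyb e (by rw [pvElems_node]; exact List.mem_cons_of_mem _ (List.mem_append.mpr (Or.inl hl2m)))

theorem pvHO_merge (a b : PvHeap) (ha : pvHO a) (hb : pvHO b) : pvHO (pvMerge a b) :=
  pvMergeF_HO _ a b (le_refl _) ha hb

theorem pvMerge_size (a b : PvHeap) : (pvMerge a b).size = a.size + b.size := by
  have h := pvMergeF_elems_ms (a.size + b.size) a b (le_refl _)
  have hlen : (pvMerge a b).elems.length = a.elems.length + b.elems.length := by
    have := congrArg Multiset.card h
    simpa [pvMerge] using this
  have hsz : ∀ (t : PvHeap), t.elems.length = t.size := by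
    intro t
    induction t with
    | nil => rfl
    | node x l r ihl ihr => simp [pvElems_node, pvSize_node, ihl, ihr]
  rw [← hsz, ← hsz, ← hsz, hlen]

theorem pvHeapify_elems_perm (xs : List (Int × List Int × Int)) :
    (pvHeapify xs).elems.Perm xs := by
  suffices h : ∀ (h0 : PvHeap),
      (xs.foldl (fun h e => pvMerge h (.node e .nil .nil)) h0).elems.Perm (h0.elems ++ xs) by
    have h2 := h .nil
    rw [show PvHeap.nil.elems = [] from rfl, List.nil_append] at h2
    rw [pvHeapify]
    exact h2
  induction xs with
  | nil => intro h0; simp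
  | cons x t ih =>
      intro h0
      simp only [List.foldl_cons]
      refine (ih _).trans ?_
      have hp : (pvMerge h0 (PvHeap.node x .nil .nil)).elems.Perm (h0.elems ++ [x]) := by
        refine (pvMerge_elems_perm h0 _).trans ?_
        rw [show (PvHeap.node x PvHeap.nil PvHeap.nil).elems = [x] from rfl]
      refine (hp.append_right t).trans (List.Perm.of_eq ?_)
      rw [List.append_assoc]
      rfl

theorem pvHO_heapify (xs : List (Int × List Int × Int)) : pvHO (pvHeapify xs) := by
  suffices h : ∀ (h0 : PvHeap), pvHO h0 →
      pvHO (xs.foldl (fun h e => pvMerge h (.node e .nil .nil)) h0) by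
    exact h .nil trivial
  induction xs with
  | nil => intro h0 hh; exact hh
  | cons x t ih =>
      intro h0 hh
      simp only [List.foldl_cons]
      refine ih _ (pvHO_merge _ _ hh ?_)
      exact ⟨by simp [PvHeap.elems], trivial, trivial⟩

-- the central loop invariant: popping while the top's size is m returns acc ++ the sorted
-- list of all elements of the heap whose first component is m
theorem pvPopLoopF_eq (m : Int) : ∀ (n : Nat) (h : PvHeap), h.size ≤ n → pvHO h →
    h.elems.Pairwise (fun a b => pvKey a ≠ pvKey b) →
    (∀ e ∈ h.elems, m ≤ e.1) →
    ∀ acc, pvPopLoopF n m acc h =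
      acc ++ PySem.List.sorted (h.elems.filter (fun e => decide (e.1 = m))) pvKey := by
  intro n
  induction n with
  | zero =>
      intro h hsz _ _ _ acc
      cases h with
      | nil => simp [pvPopLoopF, PvHeap.elems, PySem.List.sorted]
      | node y l r => simp [pvSize_node] at hsz
  | succ n ih =>
      intro h hsz hho hdist hmin acc
      cases h with
      | nil => simp [pvPopLoopF, PvHeap.elems, PySem.List.sorted]
      | node y l r =>
        obtain ⟨hroot, hl, hr⟩ := hho
        have hperm : (pvMerge l r).elems.Perm (l.elems ++ r.elems) := pvMerge_elems_perm l r
        have helems : (PvHeap.node y l r).elems = y :: (l.elems ++ r.elems) := rfl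
        rw [helems] at hdist
        have hdist' := (List.pairwise_cons.mp hdist).2
        have hheadne := (List.pairwise_cons.mp hdist).1
        have hdistm : (pvMerge l r).elems.Pairwise (fun a b => pvKey a ≠ pvKey b) :=
          (hperm.pairwise_iff (fun h => Ne.symm h)).mpr hdist'
        by_cases hy : y.1 = m
        · rw [pvPopLoopF, if_pos hy]
          have hszm : (pvMerge l r).size ≤ n := by
            rw [pvMerge_size]
            rw [pvSize_node] at hsz
            omega
          have hminm : ∀ e ∈ (pvMerge l r).elems, m ≤ e.1 := by
            intro e he
            exact hmin e (by rw [helems]; exact List.mem_cons_of_mem _ (hperm.mem_iff.mp he))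
          rw [ih (pvMerge l r) hszm (pvHO_merge l r hl hr) hdistm hminm]
          have hsortcons :
              PySem.List.sorted ((PvHeap.node y l r).elems.filter (fun e => decide (e.1 = m))) pvKey
                = y :: PySem.List.sorted ((pvMerge l r).elems.filter (fun e => decide (e.1 = m))) pvKey := by
            apply PySem.List.sorted_eq_of_perm_of_pairwise_lt
            · -- permutation
              refine List.Perm.trans (List.Perm.cons y (PySem.List.sorted_perm _ _ _)) ?_
              rw [helems, List.filter_cons, if_pos (by simpa using hy)]
              exact List.Perm.cons y (hperm.filter _)
            · -- strict pairwise
              rw [List.pairwise_cons]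
              constructor
              · intro b hb
                have hbmem : b ∈ (pvMerge l r).elems :=
                  List.mem_of_mem_filter ((PySem.List.sorted_perm _ _ _).mem_iff.mp hb)
                have hbm : b ∈ l.elems ++ r.elems := hperm.mem_iff.mp hbmem
                have hle : pvKey y ≤ pvKey b :=
                  hroot b (by rw [helems]; exact List.mem_cons_of_mem _ hbm)
                exact lt_of_le_of_ne hle (hheadne b hbm)
              · have hp1 := PySem.List.sorted_pairwise
                  ((pvMerge l r).elems.filter (fun e => decide (e.1 = m))) pvKey
                have hp2 : (PySem.List.sorted ((pvMerge l r).elems.filter (fun e => decide (e.1 = m))) pvKey).Pairwise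
                    (fun a b => pvKey a ≠ pvKey b) := by
                  refine ((PySem.List.sorted_perm _ _ _).pairwise_iff (fun h => Ne.symm h)).mpr ?_
                  exact hdistm.sublist List.filter_sublist
                exact (hp1.and hp2).imp (fun h => lt_of_le_of_ne h.1 h.2)
          rw [hsortcons]
          simp
        · rw [pvPopLoopF, if_neg hy]
          have hfilter : (PvHeap.node y l r).elems.filter (fun e => decide (e.1 = m)) = [] := by
            rw [List.filter_eq_nil_iff]
            intro e he
            rw [helems] at he
            rcases List.mem_cons.mp he with rfl | hmem
            · simpa using hy
            · have h1 : pvKey y ≤ pvKey e :=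
                hroot e (by rw [helems]; exact List.mem_cons_of_mem _ hmem)
              have h2 : m ≤ y.1 := hmin y (by rw [helems]; exact List.mem_cons_self)
              have h3 : m < y.1 := lt_of_le_of_ne h2 (fun hh => hy hh.symm)
              have h4 := pvKey_le_fst h1
              simp only [decide_eq_true_eq]
              omega
          rw [hfilter]
          simp [PySem.List.sorted]

theorem pvPopLoop_eq (m : Int) (h : PvHeap) (hho : pvHO h)
    (hdist : h.elems.Pairwise (fun a b => pvKey a ≠ pvKey b))
    (hmin : ∀ e ∈ h.elems, m ≤ e.1) (acc : List (Int × List Int × Int)) :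
    pvPopLoop m acc h =
      acc ++ PySem.List.sorted (h.elems.filter (fun e => decide (e.1 = m))) pvKey :=
  pvPopLoopF_eq m h.size h (le_refl _) hho hdist hmin acc

-- popping the root first and looping on the rest is the same as looping on the whole heap
theorem pvPopLoop_node (x : Int × List Int × Int) (l r : PvHeap) :
    pvPopLoop x.1 [] (PvHeap.node x l r) = pvPopLoop x.1 [x] (pvMerge l r) := by
  rw [pvPopLoop, pvPopLoop, pvMerge_size]
  show pvPopLoopF (l.size + r.size + 1) x.1 [] (.node x l r)
      = pvPopLoopF (l.size + r.size) x.1 [x] (pvMerge l r)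
  rw [pvPopLoopF, if_pos rfl]
  rfl

-- B's comprehension produces exactly the filter of A's entry list
theorem pvFilterMap_eq_filter (m : Int) : ∀ (ps : List (Int × List Int)),
    ps.filterMap (fun p => if (p.2.length : Int) = m then some (m, p.2, p.1) else none)
      = (ps.map (fun p => ((p.2.length : Int), p.2, p.1))).filter (fun e => decide (e.1 = m)) := by
  intro ps
  induction ps with
  | nil => rfl
  | cons p t ih =>
      simp only [List.filterMap_cons, List.map_cons, List.filter_cons]
      by_cases hp : (p.2.length : Int) = m
      · rw [if_pos hp, if_pos (by simpa using hp), ih, hp]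
      · rw [if_neg hp, if_neg (by simpa using hp), ih]

-- ===== VERDICT (by name: the statement is the Claim_ definition above) =====
theorem min_size_lists_with_index_spec : Claim_equal_min_size_lists_with_index := by
  intro lol _ hpre
  unfold Spec_min_size_lists_with_index
  set entries := (PySem.List.enumerate lol).map (fun p => ((p.2.length : Int), p.2, p.1)) with hentries
  have hperm : (pvHeapify entries).elems.Perm entries := pvHeapify_elems_perm entries
  have hho := pvHO_heapify entries
  have hdist : entries.Pairwise (fun a b => pvKey a ≠ pvKey b) := by
    refine List.Pairwise.map _ ?_ (PySem.List.pairwise_lt_enumerate lol 0)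
    intro p q hpq hk
    have := pvKey_inj hk
    simp only [Prod.mk.injEq] at this
    exact absurd this.2.2 (ne_of_lt hpq)
  have hdistH : (pvHeapify entries).elems.Pairwise (fun a b => pvKey a ≠ pvKey b) :=
    (hperm.pairwise_iff (fun h => Ne.symm h)).mpr hdist
  -- the heap is nonempty
  have hne : entries ≠ [] := by
    cases lol with
    | nil => exact absurd rfl hpre
    | cons a t => simp [hentries, PySem.List.enumerate_cons]
  -- min? returns some m
  obtain ⟨m, hm⟩ : ∃ m, PySem.List.min? (lol.map (fun lst => (lst.length : Int))) (fun x => x) = some m := by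
    cases hmm : PySem.List.min? (lol.map (fun lst => (lst.length : Int))) (fun x => x) with
    | none =>
        rw [PySem.List.min?_eq_none_iff, List.map_eq_nil_iff] at hmm
        cases lol with
        | nil => exact absurd rfl hpre
        | cons a t => simp at hmm
    | some m => exact ⟨m, rfl⟩
  have hmin_entries : ∀ e ∈ entries, m ≤ e.1 := by
    intro e he
    rw [hentries, List.mem_map] at he
    obtain ⟨p, hp, rfl⟩ := he
    rw [PySem.List.mem_enumerate_iff] at hp
    obtain ⟨k, hk, rfl⟩ := hp
    exact PySem.List.min?_isMin hm _ (List.mem_map.mpr ⟨lol[k], List.getElem_mem hk, rfl⟩)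
  -- the heap is a node
  cases hheap : pvHeapify entries with
  | nil =>
      rw [hheap] at hperm
      simp only [PvHeap.elems] at hperm
      exact absurd hperm.symm.eq_nil hne
  | node x l r =>
    rw [hheap] at hperm hho hdistH
    obtain ⟨hroot, hl, hr⟩ := hho
    -- x.1 = m
    have hxmem : x ∈ entries := hperm.mem_iff.mp (by simp [PvHeap.elems])
    have h1 : m ≤ x.1 := hmin_entries x hxmem
    have h2 : x.1 ≤ m := by
      have hmmem := PySem.List.min?_mem hm
      rw [List.mem_map] at hmmem
      obtain ⟨lst, hlst, hlen⟩ := hmmem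
      obtain ⟨k, hk, rfl⟩ := List.mem_iff_getElem.mp hlst
      have hemem : ((lol[k].length : Int), lol[k], (k : Int)) ∈ entries := by
        rw [hentries, List.mem_map]
        exact ⟨((k : Int), lol[k]), Iff.mpr (PySem.List.mem_enumerate_iff lol 0 _) ⟨k, hk, by simp⟩, rfl⟩
      have := pvKey_le_fst (hroot _ (hperm.symm.mem_iff.mp hemem))
      simpa [hlen] using this
    have hxm : x.1 = m := le_antisymm h2 h1
    -- evaluate A
    have hA : min_size_lists_with_index lol
        = pvPopLoop x.1 [] (PvHeap.node x l r) := by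
      rw [min_size_lists_with_index]
      simp only [← hentries, hheap]
      rw [pvPopLoop_node]
    rw [hA, hxm]
    rw [pvPopLoop_eq m (PvHeap.node x l r)
      ⟨hroot, hl, hr⟩ hdistH (fun e he => hmin_entries e (hperm.mem_iff.mp he)) []]
    -- evaluate B
    have hB : min_size_lists_with_index_alt lol
        = PySem.List.sorted ((PySem.List.enumerate lol).filterMap
            (fun p => if (p.2.length : Int) = m then some (m, p.2, p.1) else none)) pvKey := by
      rw [min_size_lists_with_index_alt, hm]
    rw [hB, pvFilterMap_eq_filter m (PySem.List.enumerate lol), ← hentries]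
    simp only [List.nil_append]
    exact PySem.List.sorted_eq_sorted_of_perm _ _ pvKey pvKey_inj (hperm.filter _)
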